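-- pv_equiv track=rewrite | github.com/LeonardoANoman/number_for_word | main.py | len_was_generated
-- ===== SOURCE A (Python) =====
-- def len_was_generated(words_list):
--     seen = set()
--     lengths = [len(word) for word in words_list]
--     for value in lengths:
--         if value in seen:
--             return True
--         seen.add(value)
--     return False
-- ===== SOURCE B (Python) =====
-- def len_was_generated(words_list):
--     lengths = sorted(len(word) for word in words_list)
--     return any(a == b for a, b in zip(lengths, lengths[1:]))
-- ===== Notes on version B (the rewrite author's own statement) =====
-- stated objective: alternative
-- what changed: Replaces the seen-set membership loop with a sort-then-scan: sort the lengths and report whether any two adjacent sorted lengths are equal; no set is built at all.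
import Mathlib
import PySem

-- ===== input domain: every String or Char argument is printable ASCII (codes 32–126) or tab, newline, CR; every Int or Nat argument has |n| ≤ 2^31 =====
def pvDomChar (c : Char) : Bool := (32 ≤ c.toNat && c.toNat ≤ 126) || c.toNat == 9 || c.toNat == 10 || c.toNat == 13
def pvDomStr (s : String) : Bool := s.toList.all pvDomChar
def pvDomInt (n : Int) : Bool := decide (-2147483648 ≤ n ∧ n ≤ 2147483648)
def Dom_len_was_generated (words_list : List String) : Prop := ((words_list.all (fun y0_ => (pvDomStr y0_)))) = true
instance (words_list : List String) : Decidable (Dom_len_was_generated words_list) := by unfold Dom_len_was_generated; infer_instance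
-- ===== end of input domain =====

-- B replaces A's seen-set membership loop with sort-then-scan over adjacent pairs (alternative algorithm, no set).

-- ===== PORT A =====
-- the 'for value in lengths' loop with early return True, seen as a Python set
def lwgLoop (seen : PySem.Set Int) : List Int → Bool
  | [] => false
  | v :: rest =>
      if PySem.Set.contains seen v then true
      else lwgLoop (PySem.Set.add seen v) rest

def len_was_generated (words_list : List String) : Bool :=
  lwgLoop PySem.Set.empty (words_list.map PySem.Str.len)

-- ===== PORT B =====
def len_was_generated_alt (words_list : List String) : Bool :=
  let lengths := PySem.List.sorted (words_list.map PySem.Str.len) (fun x => x) false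
  (lengths.zip (lengths.drop 1)).any (fun p => p.1 == p.2)

-- ===== PRECONDITION & SPEC =====
def Spec_len_was_generated (words_list : List String) (out : Bool) : Prop := out = len_was_generated_alt words_list
instance (words_list : List String) (out : Bool) : Decidable (Spec_len_was_generated words_list out) := by unfold Spec_len_was_generated; infer_instance

-- ===== CLAIM (what is proved, stated in full; the proofs are below) =====
def Claim_equal_len_was_generated : Prop := ∀ (words_list : List String), Dom_len_was_generated words_list → Spec_len_was_generated words_list (len_was_generated words_list)

-- ===== LEMMAS AND PROOFS =====

-- A side: the early-exit loop returns false exactly when the remaining list is duplicate-free and disjoint from seen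
theorem lwg_loop_false_iff (xs : List Int) : ∀ (seen : PySem.Set Int),
    (lwgLoop seen xs = false ↔ (xs.Nodup ∧ ∀ x ∈ xs, x ∉ seen)) := by
  induction xs with
  | nil => intro seen; simp [lwgLoop]
  | cons x xs ih =>
      intro seen
      by_cases hx : x ∈ seen
      · have : PySem.Set.contains seen x = true := by simpa using hx
        simp only [lwgLoop, this, if_true]
        constructor
        · intro h; cases h
        · rintro ⟨-, hall⟩; exact absurd hx (hall x (by simp))
      · have hc : PySem.Set.contains seen x = false := by simpa using hx
        have hadd : PySem.Set.add seen x = seen ++ [x] := by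
          simp [PySem.Set.add, hx]
        simp only [lwgLoop, hc, Bool.false_eq_true, if_false, hadd]
        rw [ih (seen ++ [x])]
        constructor
        · rintro ⟨hnd, hall⟩
          refine ⟨?_, ?_⟩
          · simp only [List.nodup_cons]
            exact ⟨fun hmem => by have := hall x hmem; simp at this, hnd⟩
          · intro y hy
            rcases List.mem_cons.mp hy with rfl | hy'
            · exact hx
            · have := hall y hy'; simp at this; exact this.1
        · rintro ⟨hnd, hall⟩
          simp only [List.nodup_cons] at hnd
          refine ⟨hnd.2, fun y hy => ?_⟩
          simp only [List.mem_append, List.mem_singleton]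
          rintro (hys | rfl)
          · exact hall y (List.mem_cons_of_mem _ hy) hys
          · exact hnd.1 hy

-- B side: the adjacent-pair scan is false exactly when no two neighbours are equal
theorem adj_any_eq_false_iff (l : List Int) :
    ((l.zip (l.drop 1)).any (fun p => p.1 == p.2) = false) ↔ l.IsChain (· ≠ ·) := by
  induction l with
  | nil => simp
  | cons a t ih =>
      cases t with
      | nil => simp
      | cons b t' =>
          simp only [List.drop_succ_cons, List.drop_zero, List.zip_cons_cons, List.any_cons,
            Bool.or_eq_false_iff, List.isChain_cons_cons] at *
          constructor
          · rintro ⟨h1, h2⟩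
            exact ⟨by simpa using h1, ih.mp h2⟩
          · rintro ⟨h1, h2⟩
            exact ⟨by simpa using h1, ih.mpr h2⟩

theorem chain_lt_of_le_ne (l : List Int) (h1 : l.IsChain (· ≤ ·)) (h2 : l.IsChain (· ≠ ·)) :
    l.IsChain (· < ·) := by
  induction l with
  | nil => simp
  | cons a t ih =>
      cases t with
      | nil => simp
      | cons b t' =>
          rw [List.isChain_cons_cons] at h1 h2 ⊢
          exact ⟨lt_of_le_of_ne h1.1 h2.1, ih h1.2 h2.2⟩

theorem sorted_adj_false_iff_nodup (l : List Int) (hs : l.IsChain (· ≤ ·)) :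
    ((l.zip (l.drop 1)).any (fun p => p.1 == p.2) = false) ↔ l.Nodup := by
  rw [adj_any_eq_false_iff]
  constructor
  · intro h
    have hlt : l.IsChain (· < ·) := chain_lt_of_le_ne l hs h
    have hp : l.Pairwise (· < ·) := List.isChain_iff_pairwise.mp hlt
    exact hp.imp ne_of_lt
  · intro h
    exact List.Pairwise.isChain h

-- ===== VERDICT (by name: the statement is the Claim_ definition above) =====
theorem len_was_generated_spec : Claim_equal_len_was_generated := by
  intro words_list _
  show len_was_generated words_list = len_was_generated_alt words_list
  unfold len_was_generated len_was_generated_alt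
  set xs := words_list.map PySem.Str.len with hxs
  set l := PySem.List.sorted xs (fun x => x) false with hl
  have hperm : l.Perm xs := PySem.List.sorted_perm xs (fun x => x) false
  have hpw : l.Pairwise (fun a b => a ≤ b) := by
    simpa using PySem.List.sorted_pairwise (xs := xs) (key := fun x => x)
  have hchain : l.IsChain (· ≤ ·) := List.Pairwise.isChain hpw
  have hA : lwgLoop PySem.Set.empty xs = false ↔ xs.Nodup := by
    simpa [PySem.Set.empty] using lwg_loop_false_iff xs PySem.Set.empty
  have hB : ((l.zip (l.drop 1)).any (fun p => p.1 == p.2) = false) ↔ xs.Nodup := by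
    rw [sorted_adj_false_iff_nodup l hchain]
    exact hperm.nodup_iff
  by_cases hnd : xs.Nodup
  · rw [hA.mpr hnd, hB.mpr hnd]
  · have ha : lwgLoop PySem.Set.empty xs = true := by
      cases h : lwgLoop PySem.Set.empty xs
      · exact absurd (hA.mp h) hnd
      · rfl
    have hb : ((l.zip (l.drop 1)).any (fun p => p.1 == p.2)) = true := by
      cases h : ((l.zip (l.drop 1)).any (fun p => p.1 == p.2))
      · exact absurd (hB.mp h) hnd
      · rfl
    rw [ha, hb]
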